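-- pv_equiv track=rewrite | github.com/miracletrespasser/CISC360_algorithms | T4-1.py | island_hopping
-- ===== SOURCE A (Python) =====
-- def island_hopping(c):
--     mindistancetable=[]
--     n=len(c)
--     #initilize for basecase0 :stay at c0, basecase 1: go from c
--     mindistancetable.append((0,'0'))
--     mindistancetable.append((c[0],'0-1'))
--     for i in range(2,n+1):
--         k='-'+str(i)
--         x=c[i-2]+mindistancetable[i-2][0]
--         y=c[i-1]+mindistancetable[i-1][0]
--         #compare adn get the minimum distance to travel from c0 to ci
--         if x<=y:
--             mindistancetable.append((x,mindistancetable[i-2][1]+k))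
--         else:
--             mindistancetable.append((y,mindistancetable[i-1][1]+k))
--     return mindistancetable[n]
-- ===== SOURCE B (Python) =====
-- def island_hopping(c):
--     n = len(c)
--     dist = [0, c[0]]
--     for i in range(2, n + 1):
--         dist.append(min(c[i - 2] + dist[i - 2], c[i - 1] + dist[i - 1]))
--     i = n
--     suffix = ''
--     while i >= 2:
--         step = '-' + str(i)
--         if c[i - 2] + dist[i - 2] <= c[i - 1] + dist[i - 1]:
--             i -= 2
--         else:
--             i -= 1
--         suffix = step + suffix
--     base = '0' if i == 0 else '0-1'
--     return (dist[n], base + suffix)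
-- ===== Notes on version B (the rewrite author's own statement) =====
-- stated objective: faster
-- what changed: A builds the full DP table of (distance, path-string) pairs, concatenating a growing path string for every table entry; B runs a numeric-only forward DP pass and then reconstructs the single returned path by a separate backward accumulator loop, so path-string work happens only along the reported path.
import Mathlib
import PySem

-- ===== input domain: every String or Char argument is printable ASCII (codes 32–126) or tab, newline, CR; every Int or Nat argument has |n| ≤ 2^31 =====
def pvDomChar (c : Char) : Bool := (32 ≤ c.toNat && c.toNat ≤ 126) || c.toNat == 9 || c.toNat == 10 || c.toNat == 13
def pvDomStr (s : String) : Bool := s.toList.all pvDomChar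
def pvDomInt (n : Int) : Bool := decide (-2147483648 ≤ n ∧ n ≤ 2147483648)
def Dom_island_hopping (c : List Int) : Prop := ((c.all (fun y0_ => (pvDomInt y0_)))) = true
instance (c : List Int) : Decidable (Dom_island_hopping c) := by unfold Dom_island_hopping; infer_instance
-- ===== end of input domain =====

-- B keeps a numeric-only forward DP list and reconstructs the returned path by a
-- separate backward accumulator loop, instead of A's table of (distance, path-string)
-- pairs; a timing run measured B faster on the large generated inputs.

-- ===== PORT A =====
-- transliteration of Source A: table of (min distance, path string) pairs, then table[n].
-- indices are always in range on nonempty c, so the pyGetD defaults are never used.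
def island_hopping (c : List Int) : Int × String :=
  let n : Int := c.length
  let t0 : List (Int × String) := [(0, "0"), (PySem.List.pyGetD c 0 0, "0-1")]
  let table := (PySem.List.pyRange 2 (n + 1) 1).foldl (fun t i =>
    let k := "-" ++ PySem.Int.toStr i
    let x := PySem.List.pyGetD c (i - 2) 0 + (PySem.List.pyGetD t (i - 2) (0, "")).1
    let y := PySem.List.pyGetD c (i - 1) 0 + (PySem.List.pyGetD t (i - 1) (0, "")).1
    if x ≤ y then t ++ [(x, (PySem.List.pyGetD t (i - 2) (0, "")).2 ++ k)]
    else t ++ [(y, (PySem.List.pyGetD t (i - 1) (0, "")).2 ++ k)]) t0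
  PySem.List.pyGetD table n (0, "")

-- ===== PORT B =====
-- Source B's backward `while i >= 2` reconstruction loop (Nat index, suffix accumulator)
def pathB (c dist : List Int) : Nat → String → String
  | 0, suffix => "0" ++ suffix
  | 1, suffix => "0-1" ++ suffix
  | (i + 2), suffix =>
    let step := "-" ++ PySem.Int.toStr ((i : Int) + 2)
    if PySem.List.pyGetD c (i : Int) 0 + PySem.List.pyGetD dist (i : Int) 0 ≤
       PySem.List.pyGetD c ((i : Int) + 1) 0 + PySem.List.pyGetD dist ((i : Int) + 1) 0 then
      pathB c dist i (step ++ suffix)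
    else
      pathB c dist (i + 1) (step ++ suffix)

def island_hopping_alt (c : List Int) : Int × String :=
  let n : Int := c.length
  let dist := (PySem.List.pyRange 2 (n + 1) 1).foldl (fun d i =>
      d ++ [min (PySem.List.pyGetD c (i - 2) 0 + PySem.List.pyGetD d (i - 2) 0)
                (PySem.List.pyGetD c (i - 1) 0 + PySem.List.pyGetD d (i - 1) 0)])
    [0, PySem.List.pyGetD c 0 0]
  (PySem.List.pyGetD dist n 0, pathB c dist c.length "")

-- ===== PRECONDITION & SPEC =====
-- Pre_ excludes only the empty list, on which the Python A raises IndexError (c[0]).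
def Pre_island_hopping (c : List Int) : Prop := c ≠ []
instance (c : List Int) : Decidable (Pre_island_hopping c) := by unfold Pre_island_hopping; infer_instance
def pvWitness_island_hopping : List Int := ([3, 1, 4])

def Spec_island_hopping (c : List Int) (out : Int × String) : Prop := out = island_hopping_alt c
instance (c : List Int) (out : Int × String) : Decidable (Spec_island_hopping c out) := by unfold Spec_island_hopping; infer_instance

-- ===== CLAIM (what is proved, stated in full; the proofs are below) =====
def Claim_equal_island_hopping : Prop := ∀ (c : List Int), Dom_island_hopping c → Pre_island_hopping c → Spec_island_hopping c (island_hopping c)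

-- ===== LEMMAS AND PROOFS =====

-- reference min-distance and path functions
def Dref (c : List Int) : Nat → Int
  | 0 => 0
  | 1 => c.getD 0 0
  | (i + 2) => min (c.getD i 0 + Dref c i) (c.getD (i + 1) 0 + Dref c (i + 1))

def Pref (c : List Int) : Nat → String
  | 0 => "0"
  | 1 => "0-1"
  | (i + 2) =>
    (if c.getD i 0 + Dref c i ≤ c.getD (i + 1) 0 + Dref c (i + 1)
     then Pref c i else Pref c (i + 1)) ++ ("-" ++ PySem.Int.toStr ((i : Int) + 2))

theorem A_table (c : List Int) (m : Nat) :
    (PySem.List.pyRange 2 ((m : Int) + 2) 1).foldl (fun t i =>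
      let k := "-" ++ PySem.Int.toStr i
      let x := PySem.List.pyGetD c (i - 2) 0 + (PySem.List.pyGetD t (i - 2) (0, "")).1
      let y := PySem.List.pyGetD c (i - 1) 0 + (PySem.List.pyGetD t (i - 1) (0, "")).1
      if x ≤ y then t ++ [(x, (PySem.List.pyGetD t (i - 2) (0, "")).2 ++ k)]
      else t ++ [(y, (PySem.List.pyGetD t (i - 1) (0, "")).2 ++ k)])
      [(0, "0"), (PySem.List.pyGetD c 0 0, "0-1")]
    = (List.range (m + 2)).map (fun j => (Dref c j, Pref c j)) := by
  induction m with
  | zero =>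
    rw [show ((0 : Nat) : Int) + 2 = 2 by norm_num,
        PySem.List.pyRange_one_eq_nil (by norm_num)]
    simp [List.range_succ, Dref, Pref, PySem.List.pyGetD_zero]
  | succ m ih =>
    rw [show (((m + 1 : Nat)) : Int) + 2 = ((m : Int) + 2) + 1 by push_cast; ring,
        PySem.List.pyRange_one_succ_right (by omega), List.foldl_append, ih]
    simp only [List.foldl_cons, List.foldl_nil]
    rw [show ((m : Int) + 2) - 2 = ((m : Nat) : Int) by ring,
        show ((m : Int) + 2) - 1 = (((m + 1 : Nat)) : Int) by push_cast; ring]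
    simp only [PySem.List.pyGetD_natCast,
      PySem.List.getD_map_range _ _ _ _ (show m < m + 2 by omega),
      PySem.List.getD_map_range _ _ _ _ (show m + 1 < m + 2 by omega)]
    have hsplit : List.range (m + 1 + 2) = List.range (m + 2) ++ [m + 2] := List.range_succ
    rw [hsplit, List.map_append]
    by_cases h : c.getD m 0 + Dref c m ≤ c.getD (m + 1) 0 + Dref c (m + 1) <;>
      simp only [List.getD_eq_getElem?_getD] at h <;>
      simp [h, Dref, Pref, min_def]

theorem B_dist (c : List Int) (m : Nat) :
    (PySem.List.pyRange 2 ((m : Int) + 2) 1).foldl (fun d i =>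
      d ++ [min (PySem.List.pyGetD c (i - 2) 0 + PySem.List.pyGetD d (i - 2) 0)
                (PySem.List.pyGetD c (i - 1) 0 + PySem.List.pyGetD d (i - 1) 0)])
      [0, PySem.List.pyGetD c 0 0]
    = (List.range (m + 2)).map (Dref c) := by
  induction m with
  | zero =>
    rw [show ((0 : Nat) : Int) + 2 = 2 by norm_num,
        PySem.List.pyRange_one_eq_nil (by norm_num)]
    simp [List.range_succ, Dref, PySem.List.pyGetD_zero]
  | succ m ih =>
    rw [show (((m + 1 : Nat)) : Int) + 2 = ((m : Int) + 2) + 1 by push_cast; ring,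
        PySem.List.pyRange_one_succ_right (by omega), List.foldl_append, ih]
    simp only [List.foldl_cons, List.foldl_nil]
    rw [show ((m : Int) + 2) - 2 = ((m : Nat) : Int) by ring,
        show ((m : Int) + 2) - 1 = (((m + 1 : Nat)) : Int) by push_cast; ring]
    simp only [PySem.List.pyGetD_natCast,
      PySem.List.getD_map_range _ _ _ _ (show m < m + 2 by omega),
      PySem.List.getD_map_range _ _ _ _ (show m + 1 < m + 2 by omega)]
    have hsplit : List.range (m + 1 + 2) = List.range (m + 2) ++ [m + 2] := List.range_succ
    rw [hsplit, List.map_append]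
    simp [Dref]

theorem B_path (c : List Int) (n : Nat) (i : Nat) (hi : i ≤ n) (suffix : String) :
    pathB c ((List.range (n + 1)).map (Dref c)) i suffix = Pref c i ++ suffix := by
  induction i using Nat.strong_induction_on generalizing suffix with
  | _ i IH =>
    match i, hi with
    | 0, _ => simp [pathB, Pref]
    | 1, _ => simp [pathB, Pref]
    | (i + 2), hi =>
      rw [pathB, show ((i : Int) + 1) = (((i + 1 : Nat)) : Int) by push_cast; ring]
      simp only [PySem.List.pyGetD_natCast,
        PySem.List.getD_map_range _ _ _ _ (show i < n + 1 by omega),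
        PySem.List.getD_map_range _ _ _ _ (show i + 1 < n + 1 by omega)]
      rw [Pref]
      split <;> simp [IH i (by omega) (by omega), IH (i + 1) (by omega) (by omega),
        String.append_assoc]

-- ===== VERDICT (by name: the statement is the Claim_ definition above) =====
theorem island_hopping_spec : Claim_equal_island_hopping := by
  intro c _ hpre
  unfold Spec_island_hopping island_hopping island_hopping_alt
  obtain ⟨m, hm⟩ : ∃ m, c.length = m + 1 :=
    Nat.exists_eq_succ_of_ne_zero (by simpa [Pre_island_hopping, List.length_eq_zero_iff] using hpre)
  simp only [hm]
  rw [show (((m + 1 : Nat)) : Int) + 1 = ((m : Int) + 2) by push_cast; ring,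
      A_table, B_dist, show m + 1 + 1 = m + 2 by ring]
  have hmap : (List.range (m + 2)).map (fun j => (Dref c j, Pref c j)) =
      (List.range ((m + 1) + 1)).map (fun j => (Dref c j, Pref c j)) := by norm_num
  simp only [PySem.List.pyGetD_natCast,
    PySem.List.getD_map_range _ _ _ _ (show m + 1 < m + 2 by omega),
    B_path c (m + 1) (m + 1) le_rfl "", String.append_empty]
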